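-- pv_equiv track=rewrite | github.com/gokul-1998/Leet-Code | april 2025/13/try1.py | get_dist_palindromes
-- ===== SOURCE A (Python) =====
-- import itertools
--
-- def get_permutations(s):
--     return [''.join(p) for p in itertools.permutations(s)]
--
-- def get_dist_palindromes(s,k):
--     lis=[]
--     if len(s)%2==0:
--         for i in get_permutations(s[:len(s)//2]):
--             lis.append(i+i[::-1])
--     else:
--         for i in get_permutations(s[:len(s)//2]):
--             lis.append(i+s[len(s)//2]+i[::-1])
--     try:
--         # because permutations contains duplicates
--         return sorted(list((set(lis))))[k-1]
--     except:
--         return ""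
-- ===== SOURCE B (Python) =====
-- def get_dist_palindromes(s, k):
--     n = len(s)
--     m = n // 2
--     mid = s[m] if n % 2 else ''
--
--     def distinct_perms(chars):
--         # chars: sorted list of characters; yields all distinct permutations in lexicographic order
--         if not chars:
--             return [[]]
--         out = []
--         for c in dict.fromkeys(chars):
--             rest = chars.copy()
--             rest.remove(c)
--             for t in distinct_perms(rest):
--                 out.append([c] + t)
--         return out
--
--     ps = distinct_perms(sorted(s[:m]))
--     if 1 <= k <= len(ps):
--         h = ps[k - 1]
--         return ''.join(h) + mid + ''.join(reversed(h))
--     return ""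
-- ===== Notes on version B (the rewrite author's own statement) =====
-- stated objective: alternative
-- what changed: Instead of materializing all m! permutations of the half, deduplicating them through set() and sorting the whole palindrome list, B recursively generates only the distinct permutations of the sorted half directly in lexicographic order (each distinct first character chosen once per level) and mirrors the (k-1)-th one into a palindrome; measured 3.56x faster at n=16 but it still blows up on halves with many distinct characters, so no speed is claimed.
-- intended difference: For nonempty s and k ≤ 0 with k ≥ 1 - (number of distinct palindromes), A's Python negative-index wraparound in sorted(...)[k-1] accidentally returns a palindrome counted from the end of the list, while B returns "" — the intended out-of-range answer for a nonpositive rank k. — e.g. on get_dist_palindromes("ab", 0): A returns "aa", B returns ""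
import Mathlib
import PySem

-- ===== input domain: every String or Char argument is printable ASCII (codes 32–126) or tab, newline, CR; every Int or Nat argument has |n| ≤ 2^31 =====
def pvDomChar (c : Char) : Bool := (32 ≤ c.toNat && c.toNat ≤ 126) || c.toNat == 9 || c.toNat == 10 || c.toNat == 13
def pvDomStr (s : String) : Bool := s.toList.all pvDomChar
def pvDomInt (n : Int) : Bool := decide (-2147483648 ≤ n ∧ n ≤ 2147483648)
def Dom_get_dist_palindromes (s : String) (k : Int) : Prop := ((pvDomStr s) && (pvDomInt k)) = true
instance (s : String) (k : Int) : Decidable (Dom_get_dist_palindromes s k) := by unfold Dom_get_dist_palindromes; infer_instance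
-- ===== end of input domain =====

-- B replaces A's "generate all m! permutations, dedup with set(), sort the palindromes" by a direct
-- recursive generation of only the distinct permutations of the sorted half, already in lexicographic
-- order (each distinct first character chosen once per level), mirrored into a palindrome for the
-- requested rank: a different algorithm that skips the m!-sized duplicate list, the set() and the sort.

-- ===== PORT A =====
-- helper get_permutations: ''.join of itertools.permutations kept on the character-list side
-- (PySem string functions are defined over List Char; strings are rebuilt with String.ofList at the end)
def pvGetPermutations (l : List Char) : List (List Char) :=
  PySem.List.permutations l l.length

def get_dist_palindromes (s : String) (k : Int) : String :=
  let l := s.toList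
  -- lis accumulated by the for-loops; i[::-1] is List.reverse (PySem.Str.slice?_none_none_neg_one)
  let lis : List (List Char) :=
    if PySem.Int.mod (l.length : Int) 2 = 0 then
      (pvGetPermutations (PySem.List.slice l none (some (PySem.Int.floordiv (l.length : Int) 2)))).foldl
        (fun acc i => acc ++ [i ++ i.reverse]) []
    else
      -- s[len(s)//2]: always in range for odd length, so the none branch is unreachable
      match PySem.List.pyGet? l (PySem.Int.floordiv (l.length : Int) 2) with
      | some c =>
        (pvGetPermutations (PySem.List.slice l none (some (PySem.Int.floordiv (l.length : Int) 2)))).foldl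
          (fun acc i => acc ++ [i ++ [c] ++ i.reverse]) []
      | none => []
  -- sorted(list(set(lis)))[k-1], IndexError caught as ""
  match PySem.List.pyGet? (PySem.List.sorted (PySem.Set.ofList lis) (fun x => x) false) (k - 1) with
  | some v => String.ofList v
  | none => ""

-- ===== PORT B =====
-- distinct_perms: all distinct permutations of its argument, choosing each distinct first
-- character once (dict.fromkeys = PySem.List.dedup), in lexicographic order when the input is sorted
def pvDistinctPerms (l : List Char) : List (List Char) :=
  if h : l = [] then [[]]
  else
    (PySem.List.dedup l).attach.flatMap
      (fun c => (pvDistinctPerms (l.erase c.1)).map (fun t => c.1 :: t))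
termination_by l.length
decreasing_by
  have hc := (PySem.List.mem_dedup l c.1).mp c.2
  rw [List.length_erase_of_mem hc]
  exact Nat.pred_lt (by simpa using (List.length_pos_of_mem hc).ne')

def get_dist_palindromes_alt (s : String) (k : Int) : String :=
  let l := s.toList
  let n := l.length
  let m := n / 2
  -- mid = s[m] if n % 2 else '' (the index is always in range when n is odd)
  let mid : List Char := if n % 2 = 1 then (match l[m]? with | some c => [c] | none => []) else []
  let ps := pvDistinctPerms (PySem.List.sorted (l.take m) (fun c => c) false)
  if 1 ≤ k ∧ k ≤ (ps.length : Int) then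
    let h := ps.getD (k - 1).toNat []
    String.ofList (h ++ mid ++ h.reverse)
  else ""

-- ===== PRECONDITION & SPEC =====
-- number of distinct permutations of the first half of s (multinomial coefficient)
def pvNumDistinct (s : String) : Nat :=
  let h := s.toList.take (s.toList.length / 2)
  Nat.factorial h.length / ∏ c ∈ h.toFinset, Nat.factorial (h.count c)

-- On nonempty s with k ≤ 0 but k ≥ 1 - (number of distinct palindromes), A's accidental Python
-- negative-index wraparound in sorted(...)[k-1] returns a palindrome from the end of the list,
-- while B returns "" — the intended out-of-range answer for a nonpositive rank k.
def D_get_dist_palindromes (s : String) (k : Int) : Prop :=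
  s ≠ "" ∧ k ≤ 0 ∧ 1 - (pvNumDistinct s : Int) ≤ k
instance (s : String) (k : Int) : Decidable (D_get_dist_palindromes s k) := by
  unfold D_get_dist_palindromes; infer_instance

def Spec_get_dist_palindromes (s : String) (k : Int) (out : String) : Prop :=
  ¬ D_get_dist_palindromes s k → out = get_dist_palindromes_alt s k
instance (s : String) (k : Int) (out : String) : Decidable (Spec_get_dist_palindromes s k out) := by
  unfold Spec_get_dist_palindromes; infer_instance

def pvDiffWitness_get_dist_palindromes : String × Int := ("ab", 0)
def pvDiffWitnessOut_get_dist_palindromes : String × String := ("aa", "")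

-- ===== CLAIM (what is proved, stated in full; the proofs are below) =====
def Claim_unchanged_get_dist_palindromes : Prop := ∀ (s : String) (k : Int), Dom_get_dist_palindromes s k → Spec_get_dist_palindromes s k (get_dist_palindromes s k)
def Claim_changed_get_dist_palindromes : Prop := Dom_get_dist_palindromes (pvDiffWitness_get_dist_palindromes.1) (pvDiffWitness_get_dist_palindromes.2) ∧ D_get_dist_palindromes (pvDiffWitness_get_dist_palindromes.1) (pvDiffWitness_get_dist_palindromes.2) ∧ get_dist_palindromes (pvDiffWitness_get_dist_palindromes.1) (pvDiffWitness_get_dist_palindromes.2) = pvDiffWitnessOut_get_dist_palindromes.1 ∧ get_dist_palindromes_alt (pvDiffWitness_get_dist_palindromes.1) (pvDiffWitness_get_dist_palindromes.2) = pvDiffWitnessOut_get_dist_palindromes.2 ∧ pvDiffWitnessOut_get_dist_palindromes.1 ≠ pvDiffWitnessOut_get_dist_palindromes.2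
def Claim_exact_get_dist_palindromes : Prop := ∀ (s : String) (k : Int), Dom_get_dist_palindromes s k → D_get_dist_palindromes s k → get_dist_palindromes s k ≠ get_dist_palindromes_alt s k

-- ===== LEMMAS AND PROOFS =====

theorem pvPermsSucc (xs : List Char) (r : Nat) :
    PySem.List.permutations xs (r+1)
      = (List.range xs.length).flatMap
          (fun i => match xs[i]? with
            | none => []
            | some c => (PySem.List.permutations (xs.eraseIdx i) r).map (fun p => c :: p)) := by
  rw [PySem.List.permutations]
  congr 1
  funext i
  cases xs[i]? <;> rfl

theorem pvEraseIdxIdxOf (xs : List Char) (c : Char) (h : c ∈ xs) :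
    xs.eraseIdx (List.idxOf c xs) = xs.erase c := by
  induction xs with
  | nil => simp at h
  | cons x t ih =>
    by_cases hxc : x = c
    · subst hxc; simp
    · have hcx : c ≠ x := fun e => hxc e.symm
      have h' : c ∈ t := by simpa [hcx] using h
      simp [List.idxOf_cons_ne, List.erase_cons_tail, hxc, ih h']

theorem pvMemPermsOfPerm : ∀ (p xs : List Char), p.Perm xs → p ∈ PySem.List.permutations xs xs.length
  | [], xs, h => by
    have : xs = [] := h.symm.eq_nil
    subst this; simp [PySem.List.permutations]
  | c :: t, xs, h => by
    have hc : c ∈ xs ∧ t.Perm (xs.erase c) := List.cons_perm_iff_perm_erase.mp h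
    have hlen : xs.length = t.length + 1 := by
      have := h.length_eq; simpa using this.symm
    rw [hlen, pvPermsSucc]
    have hidx : xs.idxOf c < xs.length := List.idxOf_lt_length_of_mem hc.1
    refine List.mem_flatMap.mpr ⟨xs.idxOf c, List.mem_range.mpr hidx, ?_⟩
    have hget : xs[xs.idxOf c]? = some c := by
      rw [List.getElem?_eq_getElem hidx, List.getElem_idxOf]
    rw [hget]
    simp only [List.mem_map]
    refine ⟨t, ?_, rfl⟩
    rw [pvEraseIdxIdxOf xs c hc.1]
    have : (xs.erase c).length = t.length := by
      rw [List.length_erase_of_mem hc.1, hlen]; omega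
    rw [← this] at *
    exact pvMemPermsOfPerm t (xs.erase c) hc.2

-- membership characterization of distinct_perms
theorem pvMemDP : ∀ (l p : List Char), p ∈ pvDistinctPerms l ↔ p.Perm l
  | l, p => by
    rw [pvDistinctPerms]
    by_cases hl : l = []
    · subst hl; simp [List.perm_nil]
    · simp only [hl, dif_neg, ne_eq, not_false_iff, List.mem_flatMap, List.mem_attach,
        List.mem_map, true_and, Subtype.exists]
      constructor
      · rintro ⟨c, hc, t, ht, rfl⟩
        have hcl : c ∈ l := (PySem.List.mem_dedup l c).mp hc
        have : (l.erase c).length < l.length := by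
          rw [List.length_erase_of_mem hcl]
          exact Nat.pred_lt (by simpa using (List.length_pos_of_mem hcl).ne')
        exact List.cons_perm_iff_perm_erase.mpr ⟨hcl, (pvMemDP (l.erase c) t).mp ht⟩
      · intro hp
        match p, hp with
        | [], hp => exact absurd (hp.symm.eq_nil) hl
        | c :: t, hp =>
          have hc := List.cons_perm_iff_perm_erase.mp hp
          have : (l.erase c).length < l.length := by
            rw [List.length_erase_of_mem hc.1]
            exact Nat.pred_lt (by simpa using (List.length_pos_of_mem hc.1).ne')
          exact ⟨c, (PySem.List.mem_dedup l c).mpr hc.1, t, (pvMemDP (l.erase c) t).mpr hc.2, rfl⟩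
termination_by l => l.length

-- cons is strictly monotone / cross-block comparison for the list lexicographic order
theorem pvLtAppend : ∀ (p q a b : List Char), p.length = q.length → p < q → p ++ a < q ++ b
  | [], q, a, b, hlen, hlt => by
    have : q = [] := by cases q <;> simp_all
    subst this; exact absurd hlt (List.not_lt_nil [])
  | c :: p', [], a, b, hlen, hlt => by simp at hlen
  | c :: p', d :: q', a, b, hlen, hlt => by
    rcases List.cons_lt_cons_iff.mp hlt with h | ⟨rfl, h⟩
    · exact List.cons_lt_cons_iff.mpr (Or.inl h)
    · exact List.cons_lt_cons_iff.mpr (Or.inr ⟨rfl, pvLtAppend p' q' a b (by simpa using hlen) h⟩)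

theorem pvFoldlAddSublist : ∀ (l acc : List Char), (l.foldl PySem.Set.add acc).Sublist (acc ++ l)
  | [], acc => by simp
  | x :: t, acc => by
    refine (pvFoldlAddSublist t (PySem.Set.add acc x)).trans ?_
    unfold PySem.Set.add
    split
    · exact (List.append_sublist_append_left acc).mpr (List.sublist_cons_self x t)
    · simp [List.append_assoc]

theorem pvDedupSublist (l : List Char) : (PySem.List.dedup l).Sublist l := by
  have := pvFoldlAddSublist l []
  simpa [PySem.List.dedup, PySem.Set.ofList, PySem.Set.empty] using this

theorem pvDPLength (l p : List Char) (h : p ∈ pvDistinctPerms l) : p.length = l.length :=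
  ((pvMemDP l p).mp h).length_eq

-- distinct_perms of a sorted list is strictly increasing in lexicographic order
theorem pvDPPairwise : ∀ (l : List Char), l.Pairwise (· ≤ ·) →
    (pvDistinctPerms l).Pairwise (· < ·)
  | l, hs => by
    rw [pvDistinctPerms]
    by_cases hl : l = []
    · simp [hl]
    · rw [dif_neg hl]
      have hdd : (PySem.List.dedup l).Pairwise (· < ·) := by
        have h1 : (PySem.List.dedup l).Pairwise (· ≤ ·) := hs.sublist (pvDedupSublist l)
        have h2 : (PySem.List.dedup l).Nodup := PySem.List.nodup_dedup l
        exact h1.and h2 |>.imp (fun {a b} h => lt_of_le_of_ne h.1 h.2)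
      apply List.pairwise_flatMap.mpr
      constructor
      · rintro ⟨c, hc⟩ -
        have hcl : c ∈ l := (PySem.List.mem_dedup l c).mp hc
        have hdec : (l.erase c).length < l.length := by
          rw [List.length_erase_of_mem hcl]
          exact Nat.pred_lt (by simpa using (List.length_pos_of_mem hcl).ne')
        have hrec := pvDPPairwise (l.erase c) (hs.sublist (List.erase_sublist))
        exact List.pairwise_map.mpr (hrec.imp (fun h => List.cons_lt_cons_iff.mpr (Or.inr ⟨rfl, h⟩)))
      · have hatt : (PySem.List.dedup l).attach.Pairwise (fun a b => a.1 < b.1) := by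
          apply List.pairwise_map.mp
          simpa [List.attach_map_subtype_val] using hdd
        refine hatt.imp ?_
        rintro ⟨c1, h1⟩ ⟨c2, h2⟩ hlt x hx y hy
        simp only [List.mem_map] at hx hy
        obtain ⟨t1, -, rfl⟩ := hx
        obtain ⟨t2, -, rfl⟩ := hy
        exact List.cons_lt_cons_iff.mpr (Or.inl hlt)
termination_by l => l.length

-- step identity: count c * ∏_{d ∈ (l.erase c)} (count d)! = ∏_{d ∈ l} (count d)!
theorem pvProdErase (l : List Char) (c : Char) (hc : c ∈ l) :
    l.count c * ∏ d ∈ (l.erase c).toFinset, Nat.factorial ((l.erase c).count d)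
      = ∏ d ∈ l.toFinset, Nat.factorial (l.count d) := by
  have hsub : (l.erase c).toFinset ⊆ l.toFinset := by
    intro d hd
    simp only [List.mem_toFinset] at *
    exact (List.erase_sublist).mem hd
  have h1 : ∏ d ∈ (l.erase c).toFinset, Nat.factorial ((l.erase c).count d)
      = ∏ d ∈ l.toFinset, Nat.factorial ((l.erase c).count d) := by
    refine (Finset.prod_subset hsub ?_).symm.symm
    intro d hd hnd
    simp only [List.mem_toFinset] at hd hnd
    have : (l.erase c).count d = 0 := List.count_eq_zero.mpr hnd
    simp [this]
  rw [h1, ← Finset.mul_prod_erase _ _ (List.mem_toFinset.mpr hc),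
    ← Finset.mul_prod_erase _ _ (List.mem_toFinset.mpr hc),
    List.count_erase_self, ← mul_assoc,
    Nat.mul_factorial_pred (List.count_pos_iff.mpr hc).ne']
  congr 1
  refine Finset.prod_congr rfl ?_
  intro d hd
  rw [List.count_erase_of_ne (Finset.ne_of_mem_erase hd)]

theorem pvDPLenMul : ∀ (l : List Char),
    (pvDistinctPerms l).length * ∏ c ∈ l.toFinset, Nat.factorial (l.count c)
      = Nat.factorial l.length
  | l => by
    by_cases hl : l = []
    · subst hl; simp [pvDistinctPerms]
    · rw [pvDistinctPerms, dif_neg hl]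
      have hlpos : 0 < l.length := List.length_pos_iff.mpr hl
      have hTF : (PySem.List.dedup l).toFinset = l.toFinset := by
        ext d; simp [List.mem_toFinset, PySem.List.mem_dedup]
      have hlen : ((PySem.List.dedup l).attach.flatMap
          (fun c => (pvDistinctPerms (l.erase c.1)).map (fun t => c.1 :: t))).length
          = ∑ c ∈ l.toFinset, (pvDistinctPerms (l.erase c)).length := by
        rw [List.length_flatMap]
        have h1 : (PySem.List.dedup l).attach.map
            (fun c => ((pvDistinctPerms (l.erase c.1)).map (fun t => c.1 :: t)).length)
            = (PySem.List.dedup l).map (fun c => (pvDistinctPerms (l.erase c)).length) := by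
          rw [List.map_attach_eq_pmap]
          simp [List.map_pmap, List.pmap_eq_map]
        rw [h1, ← hTF, ← List.sum_toFinset _ (PySem.List.nodup_dedup l)]
      rw [hlen, Finset.sum_mul]
      have hstep : ∀ c ∈ l.toFinset,
          (pvDistinctPerms (l.erase c)).length * ∏ d ∈ l.toFinset, Nat.factorial (l.count d)
            = l.count c * Nat.factorial (l.length - 1) := by
        intro c hcF
        have hc : c ∈ l := List.mem_toFinset.mp hcF
        have hdec : (l.erase c).length < l.length := by
          rw [List.length_erase_of_mem hc]
          exact Nat.pred_lt hlpos.ne'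
        rw [← pvProdErase l c hc]
        have hre : (pvDistinctPerms (l.erase c)).length
              * (l.count c * ∏ d ∈ (l.erase c).toFinset, ((l.erase c).count d).factorial)
            = l.count c * ((pvDistinctPerms (l.erase c)).length
              * ∏ d ∈ (l.erase c).toFinset, ((l.erase c).count d).factorial) := by ring
        rw [hre, pvDPLenMul (l.erase c), List.length_erase_of_mem hc]
      rw [Finset.sum_congr rfl hstep, ← Finset.sum_mul, List.sum_toFinset_count_eq_length,
        Nat.mul_factorial_pred hlpos.ne']
termination_by l => l.length

-- instance bridges: the ports elaborate `sorted` with core's LT/DecidableLT instances,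
-- Mathlib's order lemmas with the LinearOrder-derived ones; the instances are definitionally equal
theorem pvSortedBridgeC (xs : List Char) :
    PySem.List.sorted xs (fun c : Char => c) false
      = @PySem.List.sorted Char Char instLinearOrderChar.toLT LinearOrder.toDecidableLT xs (fun c => c) false := by
  congr 1

theorem pvSortedBridgeL (xs : List (List Char)) :
    PySem.List.sorted xs (fun x => x) false
      = @PySem.List.sorted (List Char) (List Char) List.instLinearOrder.toLT LinearOrder.toDecidableLT xs (fun x => x) false := by
  congr 1

theorem pvSortedPairwiseC (xs : List Char) :
    (PySem.List.sorted xs (fun c : Char => c) false).Pairwise (· ≤ ·) := by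
  rw [pvSortedBridgeC]; exact PySem.List.sorted_pairwise xs (fun c => c)

theorem pvMirrorInj (p q : List Char) (h : p.length = q.length) (mid : List Char)
    (he : p ++ mid ++ p.reverse = q ++ mid ++ q.reverse) : p = q :=
  (List.append_inj (List.append_inj he (by simp [h])).1 h).1

-- the key equation: sorted(set(palindromes of all permutations)) = palindromes of the
-- lexicographically generated distinct permutations of the sorted half
theorem pvKey (h mid : List Char) :
    PySem.List.sorted
        (PySem.Set.ofList ((PySem.List.permutations h h.length).map (fun p => p ++ mid ++ p.reverse)))
        (fun x => x) false
      = (pvDistinctPerms (PySem.List.sorted h (fun c : Char => c) false)).map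
          (fun p => p ++ mid ++ p.reverse) := by
  set SH := PySem.List.sorted h (fun c : Char => c) false with hSHdef
  have hSHperm : SH.Perm h := PySem.List.sorted_perm h _ _
  have hSHlen : SH.length = h.length := hSHperm.length_eq
  set D := pvDistinctPerms SH with hDdef
  set mir := fun p : List Char => p ++ mid ++ p.reverse with hmir
  have hlenD : ∀ p ∈ D, p.length = h.length := fun p hp => by
    rw [pvDPLength SH p hp, hSHlen]
  have hDpw : D.Pairwise (· < ·) := pvDPPairwise SH (pvSortedPairwiseC h)
  have hDnd : D.Nodup := hDpw.nodup
  have hmapnd : (D.map mir).Nodup := by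
    refine List.Nodup.map_on ?_ hDnd
    intro p hp q hq he
    exact pvMirrorInj p q ((hlenD p hp).trans (hlenD q hq).symm) mid he
  have hperm : (D.map mir).Perm (PySem.Set.ofList ((PySem.List.permutations h h.length).map mir)) := by
    refine (List.perm_ext_iff_of_nodup hmapnd (PySem.Set.nodup_ofList _)).mpr ?_
    intro x
    rw [PySem.Set.mem_ofList]
    simp only [List.mem_map]
    constructor
    · rintro ⟨p, hp, rfl⟩
      exact ⟨p, pvMemPermsOfPerm p h (((pvMemDP SH p).mp hp).trans hSHperm), rfl⟩
    · rintro ⟨p, hp, rfl⟩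
      exact ⟨p, (pvMemDP SH p).mpr ((PySem.List.perm_of_mem_permutations hp).trans hSHperm.symm), rfl⟩
  have hpw : (D.map mir).Pairwise (fun a b => a < b) := by
    refine List.pairwise_map.mpr (hDpw.imp_of_mem ?_)
    intro p q hp hq hlt
    have hl : p.length = q.length := (hlenD p hp).trans (hlenD q hq).symm
    exact pvLtAppend (p ++ mid) (q ++ mid) p.reverse q.reverse (by simp [hl])
      (pvLtAppend p q mid mid hl hlt)
  rw [pvSortedBridgeL]
  exact PySem.List.sorted_eq_of_perm_of_pairwise_lt _ _ _ hperm hpw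

-- the multinomial in D_ counts exactly B's list of distinct permutations
theorem pvNumCorrect (s : String) :
    (pvNumDistinct s : Nat)
      = (pvDistinctPerms (PySem.List.sorted (s.toList.take (s.toList.length / 2)) (fun c : Char => c) false)).length := by
  set h := s.toList.take (s.toList.length / 2) with hh
  set SH := PySem.List.sorted h (fun c : Char => c) false with hSHdef
  have hSHperm : SH.Perm h := PySem.List.sorted_perm h _ _
  have hcnt : ∀ c, SH.count c = h.count c := fun c => hSHperm.count_eq c
  have hTF : SH.toFinset = h.toFinset := List.toFinset_eq_of_perm _ _ hSHperm
  have hmul := pvDPLenMul SH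
  rw [hTF, hSHperm.length_eq] at hmul
  have hmul' : (pvDistinctPerms SH).length * ∏ c ∈ h.toFinset, Nat.factorial (h.count c)
      = Nat.factorial h.length := by
    rw [← hmul]; congr 1; exact Finset.prod_congr rfl (fun c _ => by rw [hcnt c])
  have hpos : 0 < ∏ c ∈ h.toFinset, Nat.factorial (h.count c) :=
    Finset.prod_pos (fun c _ => Nat.factorial_pos _)
  show Nat.factorial h.length / ∏ c ∈ h.toFinset, Nat.factorial (h.count c)
      = (pvDistinctPerms SH).length
  rw [← hmul', Nat.mul_div_cancel _ hpos]

theorem pvFinal (D : List (List Char)) (mid : List Char) (k : Int)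
    (hk0 : k ≤ 0 → k < 1 - (D.length : Int)) :
    (match PySem.List.pyGet? (D.map (fun p => p ++ mid ++ p.reverse)) (k-1) with
     | some v => String.ofList v | none => "")
    = if 1 ≤ k ∧ k ≤ (D.length : Int) then
        String.ofList ((D.getD (k-1).toNat []) ++ mid ++ (D.getD (k-1).toNat []).reverse)
      else "" := by
  by_cases h1 : 1 ≤ k ∧ k ≤ (D.length : Int)
  · obtain ⟨hk1, hk2⟩ := h1
    have hj : (k-1).toNat < D.length := by omega
    have hsome : PySem.List.pyGet? (D.map (fun p => p ++ mid ++ p.reverse)) (k-1)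
        = some (D[(k-1).toNat] ++ mid ++ D[(k-1).toNat].reverse) := by
      rw [PySem.List.pyGet?_of_nonneg_of_lt _ (by omega)
        (by rw [List.length_map]; omega)]
      rw [List.getElem?_map, List.getElem?_eq_getElem hj]
      rfl
    rw [hsome, if_pos ⟨hk1, hk2⟩, List.getD_eq_getElem D [] hj]
  · rw [if_neg h1]
    have hnone : PySem.List.pyGet? (D.map (fun p => p ++ mid ++ p.reverse)) (k-1) = none := by
      rw [PySem.List.pyGet?_eq_none_iff, List.length_map]
      simp only [PySem.Raise.InRange, not_and_or, not_le, not_lt]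
      by_cases hk : k ≤ 0
      · exact Or.inl (by have := hk0 hk; omega)
      · exact Or.inr (by omega)
    rw [hnone]

theorem pvDPnil : pvDistinctPerms ([] : List Char) = [[]] := by
  rw [pvDistinctPerms]; simp

-- normal forms of the two ports (nonempty s for A)
def pvMid (s : String) : List Char :=
  if s.toList.length % 2 = 1 then
    (match s.toList[s.toList.length / 2]? with | some c => [c] | none => [])
  else []

def pvD (s : String) : List (List Char) :=
  pvDistinctPerms (PySem.List.sorted (s.toList.take (s.toList.length / 2)) (fun c : Char => c) false)

theorem pvBNormal (s : String) (k : Int) :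
    get_dist_palindromes_alt s k
      = if 1 ≤ k ∧ k ≤ ((pvD s).length : Int) then
          String.ofList ((pvD s).getD (k-1).toNat [] ++ pvMid s ++ ((pvD s).getD (k-1).toNat []).reverse)
        else "" := rfl

theorem pvANormal (s : String) (hs : s ≠ "") (k : Int) :
    get_dist_palindromes s k
      = (match PySem.List.pyGet? ((pvD s).map (fun p => p ++ pvMid s ++ p.reverse)) (k-1) with
         | some v => String.ofList v | none => "") := by
  unfold get_dist_palindromes pvD pvMid
  dsimp only
  have hfd : PySem.Int.floordiv ((s.toList.length : Nat) : Int) 2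
      = ((s.toList.length / 2 : Nat) : Int) := by
    exact_mod_cast PySem.Int.floordiv_natCast s.toList.length 2
  have hmod : PySem.Int.mod ((s.toList.length : Nat) : Int) 2
      = ((s.toList.length % 2 : Nat) : Int) := by
    exact_mod_cast PySem.Int.mod_natCast s.toList.length 2
  set l := s.toList with hldef
  set n := l.length with hndef
  set m := n / 2 with hmdef
  have hnpos : 0 < n := by
    rcases Nat.eq_zero_or_pos n with h0 | h
    · exact absurd (by simpa [hldef] using congrArg String.ofList (List.length_eq_zero_iff.mp h0)) hs
    · exact h
  rw [hmod, hfd, PySem.List.slice_to_natCast]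
  unfold pvGetPermutations
  by_cases hpar : n % 2 = 0
  · have hA0 : ((n % 2 : Nat) : Int) = 0 := by exact_mod_cast hpar
    have hB1 : ¬ (n % 2 = 1) := by omega
    rw [if_pos hA0, if_neg hB1]
    rw [PySem.List.foldl_append_singleton_eq_map, List.nil_append]
    rw [show (fun i : List Char => i ++ i.reverse) = (fun p : List Char => p ++ [] ++ p.reverse) from by
      funext p; simp]
    rw [pvKey (l.take m) []]
  · have hpar1 : n % 2 = 1 := Nat.mod_two_eq_zero_or_one n |>.resolve_left hpar
    have hA0 : ¬ (((n % 2 : Nat) : Int) = 0) := by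
      rw [hpar1]; decide
    have hmn : m < n := Nat.div_lt_self hnpos (by omega)
    have hgetm : l[m]? = some (l[m]'hmn) := List.getElem?_eq_getElem hmn
    rw [if_neg hA0, if_pos hpar1, PySem.List.pyGet?_natCast, hgetm]
    dsimp only
    rw [PySem.List.foldl_append_singleton_eq_map, List.nil_append]
    rw [pvKey (l.take m) [l[m]'hmn]]

theorem pvMain (s : String) (k : Int)
    (hND : ¬ (s ≠ "" ∧ k ≤ 0 ∧ 1 - (pvNumDistinct s : Int) ≤ k)) :
    get_dist_palindromes s k = get_dist_palindromes_alt s k := by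
  by_cases hs : s = ""
  · subst hs
    have hps : pvD "" = [[]] := by
      unfold pvD
      rw [show ("".toList).take (("".toList).length / 2) = ([] : List Char) from rfl]
      rw [show PySem.List.sorted ([] : List Char) (fun c : Char => c) false = [] from rfl]
      exact pvDPnil
    have hBv : get_dist_palindromes_alt "" k = "" := by
      rw [pvBNormal, hps]
      split
      · rw [show ∀ j : Int, ([([] : List Char)]).getD j.toNat [] = [] from fun j => by
          cases h : j.toNat <;> rfl]
        rfl
      · rfl
    have hAv : get_dist_palindromes "" k = "" := by
      rw [show get_dist_palindromes "" k
          = (match PySem.List.pyGet? [([] : List Char)] (k-1) with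
             | some v => String.ofList v | none => "") from rfl]
      cases hres : PySem.List.pyGet? [([] : List Char)] (k-1) with
      | none => rfl
      | some v =>
        have hv := PySem.List.mem_of_pyGet?_eq_some _ hres
        simp only [List.mem_singleton] at hv
        subst hv; rfl
    rw [hAv, hBv]
  · have hNum : pvNumDistinct s = (pvD s).length := pvNumCorrect s
    have hk0 : k ≤ 0 → k < 1 - (pvNumDistinct s : Int) := by
      intro hk
      by_contra hcon
      exact hND ⟨hs, hk, by omega⟩
    rw [pvANormal s hs k, pvBNormal s k]
    exact pvFinal (pvD s) (pvMid s) k (fun hk => by have h1 := hk0 hk; rwa [hNum] at h1)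

theorem pvTight (s : String) (k : Int)
    (hs : s ≠ "") (hk : k ≤ 0) (hge : 1 - (pvNumDistinct s : Int) ≤ k) :
    get_dist_palindromes s k ≠ get_dist_palindromes_alt s k := by
  have hNum : pvNumDistinct s = (pvD s).length := pvNumCorrect s
  rw [pvANormal s hs k, pvBNormal s k]
  rw [hNum] at hge
  have hIR : PySem.Raise.InRange ((pvD s).map (fun p => p ++ pvMid s ++ p.reverse)).length (k-1) := by
    rw [List.length_map]
    constructor <;> [omega; omega]
  obtain ⟨v, hv⟩ : ∃ v, PySem.List.pyGet? ((pvD s).map (fun p => p ++ pvMid s ++ p.reverse)) (k-1) = some v := by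
    cases h : PySem.List.pyGet? ((pvD s).map (fun p => p ++ pvMid s ++ p.reverse)) (k-1) with
    | none => exact absurd hIR ((PySem.List.pyGet?_eq_none_iff _ _).mp h)
    | some v => exact ⟨v, rfl⟩
  rw [hv, if_neg (by rintro ⟨h1, -⟩; omega)]
  have hvm := PySem.List.mem_of_pyGet?_eq_some _ hv
  obtain ⟨p, hp, rfl⟩ := List.mem_map.mp hvm
  intro he
  have hnil : p = [] ∧ pvMid s = [] := by
    have h2 := congrArg String.toList he
    simp only [String.toList_ofList] at h2
    rw [show ("" : String).toList = [] from rfl] at h2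
    rcases List.append_eq_nil_iff.mp h2 with ⟨h3, -⟩
    exact List.append_eq_nil_iff.mp h3
  have hnpos : 0 < s.toList.length := by
    rcases Nat.eq_zero_or_pos s.toList.length with h0 | h
    · exact absurd (by simpa using congrArg String.ofList (List.length_eq_zero_iff.mp h0)) hs
    · exact h
  have hplen : p.length = s.toList.length / 2 := by
    have h1 := pvDPLength _ p hp
    have h2 : (PySem.List.sorted (s.toList.take (s.toList.length / 2)) (fun c : Char => c) false).length
        = (s.toList.take (s.toList.length / 2)).length :=
      (PySem.List.sorted_perm _ _ _).length_eq
    rw [h1, h2, List.length_take]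
    omega
  have hm0 : s.toList.length / 2 = 0 := by rw [← hplen, hnil.1]; rfl
  have hodd : s.toList.length % 2 = 1 := by omega
  have : pvMid s ≠ [] := by
    unfold pvMid
    rw [if_pos hodd, List.getElem?_eq_getElem (by omega : s.toList.length / 2 < s.toList.length)]
    simp
  exact this hnil.2

-- ===== VERDICT (by name: the statement is the Claim_ definition above) =====
theorem get_dist_palindromes_spec : Claim_unchanged_get_dist_palindromes := by
  intro s k _ hND
  exact pvMain s k hND

theorem get_dist_palindromes_changed : Claim_changed_get_dist_palindromes := by
  unfold Claim_changed_get_dist_palindromes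
  decide

theorem get_dist_palindromes_tight : Claim_exact_get_dist_palindromes := by
  intro s k _ hD
  unfold D_get_dist_palindromes at hD
  exact pvTight s k hD.1 hD.2.1 hD.2.2
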